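-- pv_equiv track=rewrite | github.com/lowrycito/dbkb | src/training/feedback_processor.py | generalize_query_pattern
-- ===== SOURCE A (Python) =====
-- def generalize_query_pattern(original_query: str) -> str:
--     """Generalize a specific query into a reusable pattern"""
--     pattern = original_query.lower()
--
--     common_replacements = {
--         'sales orders': '[SALES_ENTITY]',
--         'customers': '[CUSTOMER_ENTITY]',
--         'products': '[PRODUCT_ENTITY]',
--         'orders': '[ORDER_ENTITY]',
--         'payments': '[PAYMENT_ENTITY]'
--     }
--
--     for term, placeholder in common_replacements.items():
--         pattern = pattern.replace(term, placeholder)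
--
--     return pattern
-- ===== SOURCE B (Python) =====
-- def generalize_query_pattern(original_query: str) -> str:
--     """Generalize a specific query into a reusable pattern.
--
--     Recursive segment decomposition: split on the first term, handle the
--     remaining terms inside each piece, and join the results with the
--     placeholder. Placeholder text is never rescanned by later terms."""
--     terms = [
--         ('sales orders', '[SALES_ENTITY]'),
--         ('customers', '[CUSTOMER_ENTITY]'),
--         ('products', '[PRODUCT_ENTITY]'),
--         ('orders', '[ORDER_ENTITY]'),
--         ('payments', '[PAYMENT_ENTITY]'),
--     ]
--
--     def go(seg, ts):
--         if not ts:
--             return seg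
--         term, placeholder = ts[0]
--         return placeholder.join(go(piece, ts[1:]) for piece in seg.split(term))
--
--     return go(original_query.lower(), terms)
-- ===== Notes on version B (the rewrite author's own statement) =====
-- stated objective: alternative
-- what changed: Replaces the five sequential full-string replace passes by a recursive segment decomposition: split on the first term, recurse with the remaining terms inside each piece, and join the pieces with the placeholder, so placeholder text is never rescanned by later terms.
import Mathlib
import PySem

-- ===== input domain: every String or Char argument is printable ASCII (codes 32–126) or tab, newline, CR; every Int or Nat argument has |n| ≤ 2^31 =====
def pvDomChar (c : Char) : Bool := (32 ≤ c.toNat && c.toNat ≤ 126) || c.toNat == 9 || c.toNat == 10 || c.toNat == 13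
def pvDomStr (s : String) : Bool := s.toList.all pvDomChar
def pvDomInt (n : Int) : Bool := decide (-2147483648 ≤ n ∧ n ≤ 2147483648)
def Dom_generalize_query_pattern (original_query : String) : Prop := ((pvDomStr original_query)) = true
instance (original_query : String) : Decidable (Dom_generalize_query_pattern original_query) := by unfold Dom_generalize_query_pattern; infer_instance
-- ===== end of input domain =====

-- B replaces the five sequential full-string replace passes by a recursive segment
-- decomposition (split on a term, recurse with the remaining terms inside each piece,
-- join with the placeholder), so placeholder text is never rescanned; equal return value.

-- ===== PORT A =====
def gq_dict : PySem.Dict String String :=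
  ((((PySem.Dict.empty.insert "sales orders" "[SALES_ENTITY]").insert
      "customers" "[CUSTOMER_ENTITY]").insert
      "products" "[PRODUCT_ENTITY]").insert
      "orders" "[ORDER_ENTITY]").insert "payments" "[PAYMENT_ENTITY]"

def generalize_query_pattern (original_query : String) : String :=
  (gq_dict.items).foldl (fun pattern tp => PySem.Str.replace pattern tp.1 tp.2)
    (PySem.Str.lower original_query)

-- ===== PORT B =====
-- Source B's term → placeholder list, as code-point lists
def gq_termsC : List (List Char × List Char) :=
  [("sales orders".toList, "[SALES_ENTITY]".toList),
   ("customers".toList,    "[CUSTOMER_ENTITY]".toList),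
   ("products".toList,     "[PRODUCT_ENTITY]".toList),
   ("orders".toList,       "[ORDER_ENTITY]".toList),
   ("payments".toList,     "[PAYMENT_ENTITY]".toList)]

-- Source B's inner go(seg, ts), on code-point lists; seg.split(term) with the nonempty
-- literal separator is exactly PySem.Chars.splitOn, placeholder.join is PySem.Chars.join
def gq_go : List Char → List (List Char × List Char) → List Char
  | seg, [] => seg
  | seg, (t, ph) :: rest =>
      PySem.Chars.join ph ((PySem.Chars.splitOn seg t).map (fun p => gq_go p rest))

def generalize_query_pattern_alt (original_query : String) : String :=
  String.ofList (gq_go (PySem.Str.lower original_query).toList gq_termsC)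

-- ===== PRECONDITION & SPEC =====
def Spec_generalize_query_pattern (original_query : String) (out : String) : Prop := out = generalize_query_pattern_alt original_query
instance (original_query : String) (out : String) : Decidable (Spec_generalize_query_pattern original_query out) := by unfold Spec_generalize_query_pattern; infer_instance

-- ===== CLAIM (what is proved, stated in full; the proofs are below) =====
def Claim_equal_generalize_query_pattern : Prop := ∀ (original_query : String), Dom_generalize_query_pattern original_query → Spec_generalize_query_pattern original_query (generalize_query_pattern original_query)

-- ===== LEMMAS AND PROOFS =====

def gqRep (old new : List Char) (l : List Char) : List Char :=
  match l with
  | [] => []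
  | c :: t =>
    if h : old.isPrefixOf (c :: t) ∧ old ≠ [] then
      new ++ gqRep old new (List.drop old.length (c :: t))
    else c :: gqRep old new t
termination_by l.length
decreasing_by
  · have h1 : 1 ≤ old.length := by
      cases old with
      | nil => exact absurd rfl h.2
      | cons a as => simp
    simp only [List.length_drop, List.length_cons]
    omega
  · simp

def gqSp (sep : List Char) (l : List Char) : List (List Char) :=
  match l with
  | [] => [[]]
  | c :: t =>
    if h : sep.isPrefixOf (c :: t) ∧ sep ≠ [] then
      [] :: gqSp sep (List.drop sep.length (c :: t))
    else (gqSp sep t).modifyHead (c :: ·)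
termination_by l.length
decreasing_by
  · have h1 : 1 ≤ sep.length := by
      cases sep with
      | nil => exact absurd rfl h.2
      | cons a as => simp
    simp only [List.length_drop, List.length_cons]
    omega
  · simp

theorem gqRep_nil (old new : List Char) : gqRep old new [] = [] := by rw [gqRep]

theorem gqRep_cons (old new : List Char) (c : Char) (t : List Char) :
    gqRep old new (c :: t) =
      if old.isPrefixOf (c :: t) ∧ old ≠ [] then
        new ++ gqRep old new (List.drop old.length (c :: t))
      else c :: gqRep old new t := by
  rw [gqRep]
  split_ifs with h
  · rfl
  · rfl

theorem gqRep_go (old new : List Char) (hold : old ≠ []) :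
    ∀ (fuel : Nat) (l acc : List Char), l.length ≤ fuel →
      PySem.Chars.replace.go old new fuel l acc = acc.reverse ++ gqRep old new l := by
  intro fuel
  induction fuel with
  | zero =>
    intro l acc hl
    have : l = [] := by
      cases l with
      | nil => rfl
      | cons c t => simp at hl
    subst this
    simp [PySem.Chars.replace.go, gqRep]
  | succ n ih =>
    intro l acc hl
    cases l with
    | nil => simp [PySem.Chars.replace.go, gqRep]
    | cons c t =>
      rw [PySem.Chars.replace.go]
      by_cases hp : old.isPrefixOf (c :: t) = true
      · rw [if_pos hp, gqRep]
        rw [dif_pos ⟨hp, hold⟩]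
        rw [ih]
        · simp
        · have h1 : 1 ≤ old.length := by
            cases old with
            | nil => exact absurd rfl hold
            | cons a as => simp
          simp only [List.length_drop, List.length_cons] at *
          omega
      · rw [if_neg hp, gqRep]
        rw [dif_neg (by tauto)]
        rw [ih t (c :: acc) (by simpa using Nat.le_of_succ_le_succ (by simpa using hl))]
        simp

theorem replace_eq_gqRep (old new l : List Char) (hold : old ≠ []) :
    PySem.Chars.replace l old new = gqRep old new l := by
  rw [PySem.Chars.replace]
  rw [if_neg (by simpa using hold)]
  rw [gqRep_go old new hold l.length l [] le_rfl]
  simp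

theorem gqSp_ne_nil (sep l : List Char) : gqSp sep l ≠ [] := by
  cases l with
  | nil => rw [gqSp]; simp
  | cons c t =>
    rw [gqSp]
    by_cases hp : sep.isPrefixOf (c :: t) = true ∧ sep ≠ []
    · rw [dif_pos hp]; simp
    · rw [dif_neg hp]
      cases h : gqSp sep t with
      | nil =>
        have := gqSp_ne_nil sep t
        exact absurd h this
      | cons p ps => simp
termination_by l.length
decreasing_by simp

theorem gqSp_go (sep : List Char) (hsep : sep ≠ []) :
    ∀ (fuel : Nat) (l cur : List Char) (acc : List (List Char)), l.length < fuel →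
      PySem.Chars.splitOn.go sep fuel l cur acc
        = acc.reverse ++ (gqSp sep l).modifyHead (cur.reverse ++ ·) := by
  intro fuel
  induction fuel with
  | zero => intro l cur acc hl; omega
  | succ n ih =>
    intro l cur acc hl
    cases l with
    | nil => simp [PySem.Chars.splitOn.go, gqSp]
    | cons c t =>
      rw [PySem.Chars.splitOn.go]
      by_cases hp : sep.isPrefixOf (c :: t) = true
      · rw [if_pos hp, gqSp, dif_pos ⟨hp, hsep⟩]
        rw [ih]
        · cases h : gqSp sep (List.drop sep.length (c :: t)) with
          | nil => exact absurd h (gqSp_ne_nil _ _)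
          | cons p ps => simp
        · have h1 : 1 ≤ sep.length := by
            cases sep with
            | nil => exact absurd rfl hsep
            | cons a as => simp
          simp only [List.length_drop, List.length_cons] at *
          omega
      · rw [if_neg hp, gqSp, dif_neg (by tauto)]
        rw [ih t (c :: cur) acc (by simp at hl ⊢; omega)]
        cases h : gqSp sep t with
        | nil => exact absurd h (gqSp_ne_nil _ _)
        | cons p ps => simp

theorem splitOn_eq_gqSp (sep l : List Char) (hsep : sep ≠ []) :
    PySem.Chars.splitOn l sep = gqSp sep l := by
  rw [PySem.Chars.splitOn]
  rw [gqSp_go sep hsep (l.length + 1) l [] [] (by omega)]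
  cases h : gqSp sep l with
  | nil => exact absurd h (gqSp_ne_nil _ _)
  | cons p ps => simp

theorem gqRep_eq_join_gqSp (old new l : List Char) (hold : old ≠ []) :
    gqRep old new l = PySem.Chars.join new (gqSp old l) := by
  cases l with
  | nil =>
    rw [gqRep, gqSp, PySem.Chars.join]
    simp [List.intercalate]
  | cons c t =>
    rw [gqRep, gqSp]
    by_cases hp : old.isPrefixOf (c :: t) = true ∧ old ≠ []
    · rw [dif_pos hp, dif_pos hp]
      rw [gqRep_eq_join_gqSp old new _ hold]
      cases h : gqSp old (List.drop old.length (c :: t)) with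
      | nil => exact absurd h (gqSp_ne_nil _ _)
      | cons p ps => rw [PySem.Chars.join_cons_cons]; simp
    · rw [dif_neg hp, dif_neg hp]
      rw [gqRep_eq_join_gqSp old new t hold]
      cases h : gqSp old t with
      | nil => exact absurd h (gqSp_ne_nil _ _)
      | cons p ps =>
        cases ps with
        | nil => simp [PySem.Chars.join_singleton]
        | cons q ps' =>
          simp only [List.modifyHead]
          rw [PySem.Chars.join_cons_cons, PySem.Chars.join_cons_cons]
          simp
termination_by l.length
decreasing_by
  · have h1 : 1 ≤ old.length := by
      cases old with
      | nil => exact absurd rfl hp.2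
      | cons a as => simp
    simp only [List.length_drop, List.length_cons]
    omega
  · simp

theorem gq_mem_of_isPrefixOf {old : List Char} {c : Char} {x : List Char}
    (hold : old ≠ []) (h : old.isPrefixOf (c :: x) = true) : c ∈ old := by
  cases old with
  | nil => exact absurd rfl hold
  | cons o os =>
    simp [List.isPrefixOf] at h
    simp [h.1]

theorem gqRep_barrier_left (old new ph b : List Char) (hold : old ≠ [])
    (hd : ∀ c ∈ ph, c ∉ old) :
    gqRep old new (ph ++ b) = ph ++ gqRep old new b := by
  induction ph with
  | nil => simp
  | cons c ph' ih =>
    rw [List.cons_append, gqRep_cons]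
    rw [if_neg]
    · rw [ih (fun c hc => hd c (List.mem_cons_of_mem _ hc))]
      simp
    · rintro ⟨hp, -⟩
      exact hd c List.mem_cons_self (gq_mem_of_isPrefixOf hold hp)

theorem gqRep_append (old new ph : List Char) (hold : old ≠ []) (hph : ph ≠ [])
    (hd : ∀ c ∈ ph, c ∉ old) (a b : List Char) :
    gqRep old new (a ++ ph ++ b) = gqRep old new a ++ gqRep old new (ph ++ b) := by
  cases a with
  | nil => simp [gqRep_nil]
  | cons c a' =>
    have hshape : (c :: a') ++ ph ++ b = c :: (a' ++ ph ++ b) := by simp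
    by_cases hp : old.isPrefixOf (c :: (a' ++ ph ++ b)) = true
    · have hpre : old <+: (c :: a') ++ (ph ++ b) := by
        have := List.isPrefixOf_iff_prefix.mp hp
        simpa using this
      have hlen : old.length ≤ (c :: a').length := by
        by_contra hlt
        push Not at hlt
        obtain ⟨d, ph', hph'⟩ : ∃ d ph', ph = d :: ph' := by
          cases ph with
          | nil => exact absurd rfl hph
          | cons d ph' => exact ⟨d, ph', rfl⟩
        have hi : (c :: a').length < old.length := hlt
        have hmem : old[(c :: a').length]'hi ∈ old := List.getElem_mem hi
        rw [hpre.getElem hi] at hmem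
        rw [List.getElem_append_right (le_refl (c :: a').length)] at hmem
        simp [hph'] at hmem
        exact hd d (by simp [hph']) hmem
      have hpa : old <+: (c :: a') :=
        List.prefix_of_prefix_length_le hpre (List.prefix_append _ _) hlen
      rw [hshape, gqRep_cons, if_pos ⟨hp, hold⟩]
      rw [show List.drop old.length (c :: (a' ++ ph ++ b))
            = List.drop old.length (c :: a') ++ ph ++ b by
        rw [← hshape, List.append_assoc, List.drop_append_of_le_length hlen, List.append_assoc]]
      rw [gqRep_append old new ph hold hph hd (List.drop old.length (c :: a')) b]
      rw [gqRep_cons (t := a'), if_pos ⟨List.isPrefixOf_iff_prefix.mpr hpa, hold⟩]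
      simp
    · have hpa : ¬ old.isPrefixOf (c :: a') = true := by
        intro hyes
        exact hp (List.isPrefixOf_iff_prefix.mpr
          (((List.isPrefixOf_iff_prefix.mp hyes).trans
            (List.prefix_append (c :: a') (ph ++ b))).trans (by rw [← List.append_assoc, hshape])))
      rw [hshape, gqRep_cons, if_neg (by tauto)]
      rw [gqRep_append old new ph hold hph hd a' b]
      rw [gqRep_cons (t := a'), if_neg (by tauto)]
      simp
termination_by a.length
decreasing_by
  · have h1 : 1 ≤ old.length := by
      cases old with
      | nil => exact absurd rfl hold
      | cons o os => simp
    simp only [List.length_drop, List.length_cons]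
    omega
  · simp

theorem gqRep_join (old new ph : List Char) (ps : List (List Char)) (hold : old ≠ [])
    (hph : ph ≠ []) (hd : ∀ c ∈ ph, c ∉ old) :
    gqRep old new (PySem.Chars.join ph ps) = PySem.Chars.join ph (ps.map (gqRep old new)) := by
  induction ps with
  | nil => simp [PySem.Chars.join, List.intercalate, gqRep_nil]
  | cons p ps ih =>
    cases ps with
    | nil => simp [PySem.Chars.join_singleton]
    | cons q ps' =>
      rw [PySem.Chars.join_cons_cons]
      rw [gqRep_append old new ph hold hph hd p (PySem.Chars.join ph (q :: ps'))]
      rw [gqRep_barrier_left old new ph _ hold hd]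
      rw [ih]
      simp only [List.map_cons]
      rw [PySem.Chars.join_cons_cons (rest := List.map (gqRep old new) ps')]
      simp

def gqFold (ts : List (List Char × List Char)) (s : List Char) : List Char :=
  ts.foldl (fun pat tp => PySem.Chars.replace pat tp.1 tp.2) s

theorem gqFold_join (ts : List (List Char × List Char)) (ph : List Char)
    (ps : List (List Char)) (hph : ph ≠ [])
    (hts : ∀ tp ∈ ts, tp.1 ≠ [] ∧ ∀ c ∈ ph, c ∉ tp.1) :
    gqFold ts (PySem.Chars.join ph ps) = PySem.Chars.join ph (ps.map (gqFold ts)) := by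
  induction ts generalizing ps with
  | nil =>
    have hid : gqFold [] = fun s => s := by funext s; simp [gqFold]
    rw [hid]
    simp
  | cons tp rest ih =>
    obtain ⟨t, ph'⟩ := tp
    obtain ⟨ht, hdisj⟩ := hts (t, ph') List.mem_cons_self
    have step : ∀ s, gqFold ((t, ph') :: rest) s = gqFold rest (gqRep t ph' s) := by
      intro s
      simp [gqFold, replace_eq_gqRep _ _ _ ht]
    rw [step, gqRep_join t ph' ph ps ht hph hdisj]
    rw [ih _ (fun tp htp => hts tp (List.mem_cons_of_mem _ htp))]
    rw [List.map_map]
    congr 1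
    apply List.map_congr_left
    intro p hp
    simp [step]

def gqGood : List (List Char × List Char) → Prop
  | [] => True
  | (t, ph) :: rest => t ≠ [] ∧ ph ≠ [] ∧ (∀ tp ∈ rest, ∀ c ∈ ph, c ∉ tp.1) ∧ gqGood rest

theorem gqGood_fst_ne_nil : ∀ (ts : List (List Char × List Char)), gqGood ts →
    ∀ tp ∈ ts, tp.1 ≠ [] := by
  intro ts
  induction ts with
  | nil => intro _ tp htp; simp at htp
  | cons hd rest ih =>
    obtain ⟨t, ph⟩ := hd
    intro hg tp htp
    rcases List.mem_cons.mp htp with heq | htp'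
    · subst heq; exact hg.1
    · exact ih hg.2.2.2 tp htp'

theorem gqFold_eq_go : ∀ (ts : List (List Char × List Char)) (s : List Char), gqGood ts →
    gqFold ts s = gq_go s ts := by
  intro ts
  induction ts with
  | nil => intro s _; simp [gqFold, gq_go]
  | cons hd rest ih =>
    obtain ⟨t, ph⟩ := hd
    intro s hg
    obtain ⟨ht, hph, hdisj, hgrest⟩ := hg
    have step : gqFold ((t, ph) :: rest) s = gqFold rest (gqRep t ph s) := by
      simp [gqFold, replace_eq_gqRep _ _ _ ht]
    rw [step, gqRep_eq_join_gqSp _ _ _ ht]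
    rw [gqFold_join rest ph _ hph
      (fun tp htp => ⟨gqGood_fst_ne_nil rest hgrest tp htp, hdisj tp htp⟩)]
    rw [gq_go, splitOn_eq_gqSp _ _ ht]
    congr 1
    apply List.map_congr_left
    intro p hp
    exact ih p hgrest

theorem gqGood_terms : gqGood gq_termsC := by
  have hb : ∀ (ph t : List Char), (ph.all fun c => !(t.contains c)) = true → ∀ c ∈ ph, c ∉ t := by
    intro ph t h c hc
    have := List.all_eq_true.mp h c hc
    simpa using this
  simp only [gqGood, gq_termsC, List.forall_mem_cons]
  and_intros
  all_goals try exact hb _ _ (by decide)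
  all_goals decide

-- ===== VERDICT (by name: the statement is the Claim_ definition above) =====
theorem generalize_query_pattern_spec : Claim_equal_generalize_query_pattern := by
  intro q _dom
  unfold Spec_generalize_query_pattern
  have hitems : gq_dict.items =
      [("sales orders", "[SALES_ENTITY]"), ("customers", "[CUSTOMER_ENTITY]"),
       ("products", "[PRODUCT_ENTITY]"), ("orders", "[ORDER_ENTITY]"),
       ("payments", "[PAYMENT_ENTITY]")] := by decide
  have hA : (generalize_query_pattern q).toList = gqFold gq_termsC (PySem.Str.lower q).toList := by
    simp only [generalize_query_pattern, hitems, List.foldl_cons, List.foldl_nil,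
      gqFold, gq_termsC, PySem.Str.toList_replace]
  have hB : (generalize_query_pattern_alt q).toList = gq_go (PySem.Str.lower q).toList gq_termsC := by
    simp [generalize_query_pattern_alt]
  have h : (generalize_query_pattern q).toList = (generalize_query_pattern_alt q).toList := by
    rw [hA, hB, gqFold_eq_go gq_termsC _ gqGood_terms]
  exact String.toList_inj.mp h
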